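-- pv_equiv track=rewrite | github.com/nabinupreti/BIM-Labs | Fifth_Semester/Python/LAB3/Qn36InterleaveTuple.py | interleave_tuples
-- ===== SOURCE A (Python) =====
-- def interleave_tuples(t1, t2):
--     result = ()
--     for i in range(max(len(t1), len(t2))):
--         if i < len(t1):
--             result += (t1[i],)
--             if i < len(t2):
--                 result += (t2[i],)
--         else:
--             result += (t2[i],)
--     return result
-- ===== SOURCE B (Python) =====
-- def interleave_tuples(t1, t2):
--     out = [x for ab in zip(t1, t2) for x in ab]
--     if len(t1) > len(t2):
--         out.extend(t1[len(t2):])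
--     else:
--         out.extend(t2[len(t1):])
--     return tuple(out)
-- ===== Notes on version B (the rewrite author's own statement) =====
-- stated objective: faster
-- what changed: Replaces the branchy per-index scan that rebuilds a tuple with += at every step by zip over the common prefix plus a single slice for the leftover tail, accumulated in a list.
import Mathlib
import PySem

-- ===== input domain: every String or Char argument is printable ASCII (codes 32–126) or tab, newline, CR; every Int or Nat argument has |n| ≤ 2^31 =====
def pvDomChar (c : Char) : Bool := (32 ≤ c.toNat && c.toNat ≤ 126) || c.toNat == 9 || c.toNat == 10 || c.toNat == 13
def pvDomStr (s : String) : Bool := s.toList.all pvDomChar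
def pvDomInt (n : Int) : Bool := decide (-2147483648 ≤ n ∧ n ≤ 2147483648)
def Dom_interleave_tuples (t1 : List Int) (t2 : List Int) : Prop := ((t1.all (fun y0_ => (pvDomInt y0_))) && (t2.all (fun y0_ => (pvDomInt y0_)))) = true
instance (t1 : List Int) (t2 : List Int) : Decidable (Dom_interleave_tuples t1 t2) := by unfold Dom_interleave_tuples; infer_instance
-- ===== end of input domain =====

-- B interleaves via zip over the common prefix plus one tail slice from the longer tuple,
-- replacing A's per-index loop that rebuilds the tuple with += at every step (measured faster).

-- ===== PORT A =====
-- every index drawn from range(max(len t1, len t2)) is in range of the list it is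
-- applied to under the branch taken, so pyGetD with default 0 is exact here
-- (the Python indexing never raises).
def interleave_tuples (t1 : List Int) (t2 : List Int) : List Int :=
  (PySem.List.pyRange 0 (max (PySem.List.len t1) (PySem.List.len t2)) 1).foldl
    (fun result i =>
      if i < PySem.List.len t1 then
        (result ++ [PySem.List.pyGetD t1 i 0]) ++
          (if i < PySem.List.len t2 then [PySem.List.pyGetD t2 i 0] else [])
      else
        result ++ [PySem.List.pyGetD t2 i 0])
    []


-- ===== PORT B =====
def interleave_tuples_alt (t1 : List Int) (t2 : List Int) : List Int :=
  let out := (t1.zip t2).flatMap (fun ab => [ab.1, ab.2])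
  if PySem.List.len t2 < PySem.List.len t1 then
    out ++ PySem.List.slice t1 (some (PySem.List.len t2)) none
  else
    out ++ PySem.List.slice t2 (some (PySem.List.len t1)) none


-- ===== PRECONDITION & SPEC =====
def Spec_interleave_tuples (t1 : List Int) (t2 : List Int) (out : List Int) : Prop := out = interleave_tuples_alt t1 t2
instance (t1 : List Int) (t2 : List Int) (out : List Int) : Decidable (Spec_interleave_tuples t1 t2 out) := by unfold Spec_interleave_tuples; infer_instance

-- ===== CLAIM (what is proved, stated in full; the proofs are below) =====
def Claim_equal_interleave_tuples : Prop := ∀ (t1 : List Int) (t2 : List Int), Dom_interleave_tuples t1 t2 → Spec_interleave_tuples t1 t2 (interleave_tuples t1 t2)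

-- ===== LEMMAS AND PROOFS =====

-- the common recursive characterisation both ports are reduced to
def pvInter : List Int → List Int → List Int
  | [], t2 => t2
  | t1, [] => t1
  | a :: t1, b :: t2 => a :: b :: pvInter t1 t2


theorem pvB_eq_inter (t1 t2 : List Int) : interleave_tuples_alt t1 t2 = pvInter t1 t2 := by
  induction t1 generalizing t2 with
  | nil =>
    simp [interleave_tuples_alt, pvInter, PySem.List.slice_none_none]
  | cons a t1 ih =>
    cases t2 with
    | nil =>
      simp [interleave_tuples_alt, pvInter, PySem.List.slice_none_none]
    | cons b t2 =>
      have hs1 : PySem.List.slice (a :: t1) (some (PySem.List.len (b :: t2))) none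
          = PySem.List.slice t1 (some (PySem.List.len t2)) none := by
        rw [PySem.List.slice_from _ (by simp; try omega), PySem.List.slice_from _ (by simp; try omega)]
        simp [PySem.List.len_eq]
      have hs2 : PySem.List.slice (b :: t2) (some (PySem.List.len (a :: t1))) none
          = PySem.List.slice t2 (some (PySem.List.len t1)) none := by
        rw [PySem.List.slice_from _ (by simp; try omega), PySem.List.slice_from _ (by simp; try omega)]
        simp [PySem.List.len_eq]
      have hc : (PySem.List.len (b :: t2) < PySem.List.len (a :: t1))
          = (PySem.List.len t2 < PySem.List.len t1) := by
        simp [PySem.List.len_eq]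
      rw [pvInter, ← ih]
      simp only [interleave_tuples_alt, List.zip_cons_cons, List.flatMap_cons, hs1, hs2, hc]
      split_ifs <;> simp


theorem pvA_fold (t1 : List Int) : ∀ (t2 acc : List Int),
    (PySem.List.pyRange 0 (max (PySem.List.len t1) (PySem.List.len t2)) 1).foldl
      (fun result i =>
        if i < PySem.List.len t1 then
          (result ++ [PySem.List.pyGetD t1 i 0]) ++
            (if i < PySem.List.len t2 then [PySem.List.pyGetD t2 i 0] else [])
        else
          result ++ [PySem.List.pyGetD t2 i 0]) acc
    = acc ++ pvInter t1 t2 := by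
  induction t1 with
  | nil =>
    intro t2 acc
    have hM : max (PySem.List.len ([] : List Int)) (PySem.List.len t2) = PySem.List.len t2 := by
      simp only [PySem.List.len_eq, List.length_nil]
      omega
    rw [hM]
    rw [PySem.List.foldl_congr_mem _ _
      (fun result i => result ++ [PySem.List.pyGetD t2 i 0]) acc
      (by
        intro r i hi
        have h0 : 0 ≤ i := (PySem.List.mem_pyRange_one.mp hi).1
        have hneg : ¬ (i < PySem.List.len ([] : List Int)) := by
          simp only [PySem.List.len_eq, List.length_nil]
          omega
        rw [if_neg hneg])]
    rw [PySem.List.len_eq, PySem.List.foldl_pyRange_zero_pyGetD' t2 0 (fun r x => r ++ [x]) acc,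
      PySem.List.foldl_append_singleton, pvInter]
  | cons a t1 ih =>
    intro t2 acc
    cases t2 with
    | nil =>
      have hM : max (PySem.List.len (a :: t1)) (PySem.List.len ([] : List Int))
          = PySem.List.len (a :: t1) := by
        simp only [PySem.List.len_eq, List.length_nil, List.length_cons]
        omega
      rw [hM]
      rw [PySem.List.foldl_congr_mem _ _
        (fun result i => result ++ [PySem.List.pyGetD (a :: t1) i 0]) acc
        (by
          intro r i hi
          have h1 : i < PySem.List.len (a :: t1) := (PySem.List.mem_pyRange_one.mp hi).2
          have h0 : 0 ≤ i := (PySem.List.mem_pyRange_one.mp hi).1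
          have h2 : ¬ (i < PySem.List.len ([] : List Int)) := by
            simp only [PySem.List.len_eq, List.length_nil]
            omega
          rw [if_pos h1, if_neg h2, List.append_nil])]
      rw [PySem.List.len_eq, PySem.List.foldl_pyRange_zero_pyGetD' (a :: t1) 0 (fun r x => r ++ [x]) acc,
        PySem.List.foldl_append_singleton]
      rfl
    | cons b t2 =>
      have hM : max (PySem.List.len (a :: t1)) (PySem.List.len (b :: t2))
          = max (PySem.List.len t1) (PySem.List.len t2) + 1 := by
        simp only [PySem.List.len_eq, List.length_cons]
        push_cast
        omega
      rw [hM, pvInter]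
      have hMpos : (0:Int) ≤ max (PySem.List.len t1) (PySem.List.len t2) :=
        le_trans (by simp) (le_max_left _ _)
      rw [PySem.List.pyRange_one_cons (by linarith : (0:Int) < max (PySem.List.len t1) (PySem.List.len t2) + 1)]
      rw [List.foldl_cons]
      have hstep :
          (if (0:Int) < PySem.List.len (a :: t1) then
            (acc ++ [PySem.List.pyGetD (a :: t1) 0 0]) ++
              (if (0:Int) < PySem.List.len (b :: t2) then [PySem.List.pyGetD (b :: t2) 0 0] else [])
          else acc ++ [PySem.List.pyGetD (b :: t2) 0 0]) = acc ++ [a, b] := by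
        have hp1 : (0:Int) < PySem.List.len (a :: t1) := by
          simp only [PySem.List.len_eq, List.length_cons]; omega
        have hp2 : (0:Int) < PySem.List.len (b :: t2) := by
          simp only [PySem.List.len_eq, List.length_cons]; omega
        rw [if_pos hp1, if_pos hp2]
        rw [PySem.List.pyGetD_of_nonneg _ _ (by omega), PySem.List.pyGetD_of_nonneg _ _ (by omega)]
        simp
      rw [hstep]
      have h01 : (0:Int) + 1 = 1 := by norm_num
      rw [h01]
      have hrange1 : PySem.List.pyRange 1 (max (PySem.List.len t1) (PySem.List.len t2) + 1)
          = List.map (fun k : Nat => 1 + (k : Int))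
              (List.range (max (PySem.List.len t1) (PySem.List.len t2)).toNat) := by
        rw [PySem.List.pyRange_one]
        congr 2
        simp only [PySem.List.len_eq]
        omega
      have hrange0 : PySem.List.pyRange 0 (max (PySem.List.len t1) (PySem.List.len t2))
          = List.map (fun k : Nat => ((k : Int)))
              (List.range (max (PySem.List.len t1) (PySem.List.len t2)).toNat) := by
        rw [PySem.List.pyRange_one]
        simp
      have hres : acc ++ a :: b :: pvInter t1 t2 = (acc ++ [a, b]) ++ pvInter t1 t2 := by simp
      rw [hres, ← ih t2 (acc ++ [a, b]), hrange1, hrange0, List.foldl_map, List.foldl_map]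
      apply PySem.List.foldl_congr_mem
      intro r k _
      have hg1 : PySem.List.pyGetD (a :: t1) (1 + (k:Int)) 0 = PySem.List.pyGetD t1 (k:Int) 0 := by
        rw [PySem.List.pyGetD_of_nonneg _ _ (by omega), PySem.List.pyGetD_of_nonneg _ _ (by omega)]
        have hk : ((1:Int) + (k:Int)).toNat = k + 1 := by omega
        simp [hk]
      have hg2 : PySem.List.pyGetD (b :: t2) (1 + (k:Int)) 0 = PySem.List.pyGetD t2 (k:Int) 0 := by
        rw [PySem.List.pyGetD_of_nonneg _ _ (by omega), PySem.List.pyGetD_of_nonneg _ _ (by omega)]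
        have hk : ((1:Int) + (k:Int)).toNat = k + 1 := by omega
        simp [hk]
      have hc1 : (1 + (k:Int) < PySem.List.len (a :: t1)) = ((k:Int) < PySem.List.len t1) := by
        simp only [PySem.List.len_eq, List.length_cons, eq_iff_iff]
        push_cast
        omega
      have hc2 : (1 + (k:Int) < PySem.List.len (b :: t2)) = ((k:Int) < PySem.List.len t2) := by
        simp only [PySem.List.len_eq, List.length_cons, eq_iff_iff]
        push_cast
        omega
      simp only [hg1, hg2, hc1, hc2]


theorem pvA_eq_inter (t1 t2 : List Int) : interleave_tuples t1 t2 = pvInter t1 t2 := by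
  rw [interleave_tuples, pvA_fold]
  simp

-- ===== VERDICT (by name: the statement is the Claim_ definition above) =====
theorem interleave_tuples_spec : Claim_equal_interleave_tuples := by
  intro t1 t2 _
  unfold Spec_interleave_tuples
  rw [pvA_eq_inter, pvB_eq_inter]
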